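-- pv_equiv track=rewrite | github.com/RajeshShedolkar/DS-Algo | strings/alternate_case_and_reverse_vowels.py | alternate_case_and_reverse_vowels
-- ===== SOURCE A (Python) =====
-- def alternate_case_and_reverse_vowels(s: str) -> str:
--     def reverse_vowels(string):
--         vowels = "aeiouAEIOU"
--         string_list = list(string)
--         vowel_positions = [i for i in range(len(string)) if string[i] in vowels]
--         left, right = 0, len(vowel_positions) - 1
--
--         # Reverse the vowels
--         while left < right:
--             string_list[vowel_positions[left]], string_list[vowel_positions[right]] = (
--                 string_list[vowel_positions[right]],
--                 string_list[vowel_positions[left]],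
--             )
--             left += 1
--             right -= 1
--         return ''.join(string_list)
--
--     # Apply alternate case
--     alternate_cased = ''.join(
--         char.upper() if i % 2 == 0 else char.lower()
--         for i, char in enumerate(s)
--     )
--
--     # Reverse vowels in the alternate cased string
--     result = reverse_vowels(alternate_cased)
--     return result
-- ===== SOURCE B (Python) =====
-- def alternate_case_and_reverse_vowels(s: str) -> str:
--     vowels = "aeiouAEIOU"
--     # alternate-case pass
--     cased = [c.upper() if i % 2 == 0 else c.lower() for i, c in enumerate(s)]
--     # reversed stream of the vowels of the cased string, consumed front-to-back
--     rev = [c for c in cased if c in vowels][::-1]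
--     out = []
--     for c in cased:
--         if c in vowels:
--             out.append(rev[0])
--             rev = rev[1:]
--         else:
--             out.append(c)
--     return ''.join(out)
-- ===== Notes on version B (the rewrite author's own statement) =====
-- stated objective: alternative
-- what changed: Replaces the index-array two-pointer in-place vowel swap with a single left-to-right pass that consumes a precomputed reversed stream of the vowels of the cased string.
import Mathlib
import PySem

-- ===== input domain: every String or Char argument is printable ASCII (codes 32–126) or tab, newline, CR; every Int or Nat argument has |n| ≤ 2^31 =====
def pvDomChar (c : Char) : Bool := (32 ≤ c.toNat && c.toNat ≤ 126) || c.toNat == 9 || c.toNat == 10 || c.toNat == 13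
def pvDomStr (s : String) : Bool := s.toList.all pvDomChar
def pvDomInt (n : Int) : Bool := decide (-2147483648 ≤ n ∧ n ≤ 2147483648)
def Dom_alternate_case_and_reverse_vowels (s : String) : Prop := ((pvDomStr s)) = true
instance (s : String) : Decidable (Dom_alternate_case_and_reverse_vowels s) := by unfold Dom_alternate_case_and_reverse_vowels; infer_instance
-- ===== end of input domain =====

-- B replaces A's index-array two-pointer in-place vowel swap by a single pass consuming a
-- reversed stream of the cased string's vowels (alternative decomposition, same cost).

-- ===== PORT A =====
-- vowels = "aeiouAEIOU"
def pvVowels : List Char := ['a', 'e', 'i', 'o', 'u', 'A', 'E', 'I', 'O', 'U']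

-- `string[i] in vowels` / `char in vowels`: membership of a one-char string in "aeiouAEIOU"
def pvIsVowel (c : Char) : Bool := PySem.Chars.isIn [c] pvVowels

-- ''.join(char.upper() if i % 2 == 0 else char.lower() for i, char in enumerate(s))
-- (this comprehension is the identical line in A and in B, so both ports share it)
def pvCased (s : List Char) : List Char :=
  (PySem.List.enumerate s 0).map
    (fun p => if PySem.Int.mod p.1 2 = 0 then PySem.Chars.upperChar p.2 else PySem.Chars.lowerChar p.2)

-- the `while left < right` swap loop of reverse_vowels
def pvSwapLoop (pos : List Int) (lst : List Char) (left right : Int) : List Char :=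
  if left < right then
    let pl := PySem.List.pyGetD pos left 0
    let pr := PySem.List.pyGetD pos right 0
    let cl := PySem.List.pyGetD lst pl ' '
    let cr := PySem.List.pyGetD lst pr ' '
    pvSwapLoop pos (PySem.List.pySetD (PySem.List.pySetD lst pl cr) pr cl) (left + 1) (right - 1)
  else lst
termination_by (right - left).toNat
decreasing_by omega

def alternate_case_and_reverse_vowels (s : String) : String :=
  let alternate_cased := pvCased s.toList
  let vowel_positions :=
    (PySem.List.pyRange 0 (alternate_cased.length : Int)).filter
      (fun i => pvIsVowel (PySem.List.pyGetD alternate_cased i ' '))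
  String.ofList (pvSwapLoop vowel_positions alternate_cased 0 ((vowel_positions.length : Int) - 1))

-- ===== PORT B =====
-- the single pass: emit the next reversed vowel at each vowel slot, other chars unchanged
def pvFillRev : List Char → List Char → List Char
  | [], _ => []
  | c :: cs, rev =>
    if pvIsVowel c then
      match rev with
      | v :: rest => v :: pvFillRev cs rest
      | [] => c :: pvFillRev cs []   -- unreachable: the stream never runs out
    else c :: pvFillRev cs rev

def alternate_case_and_reverse_vowels_alt (s : String) : String :=
  let cased := pvCased s.toList
  let rev := (cased.filter pvIsVowel).reverse
  String.ofList (pvFillRev cased rev)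

-- ===== PRECONDITION & SPEC =====
def Spec_alternate_case_and_reverse_vowels (s : String) (out : String) : Prop := out = alternate_case_and_reverse_vowels_alt s
instance (s : String) (out : String) : Decidable (Spec_alternate_case_and_reverse_vowels s out) := by unfold Spec_alternate_case_and_reverse_vowels; infer_instance

-- ===== CLAIM (what is proved, stated in full; the proofs are below) =====
def Claim_equal_alternate_case_and_reverse_vowels : Prop := ∀ (s : String), Dom_alternate_case_and_reverse_vowels s → Spec_alternate_case_and_reverse_vowels s (alternate_case_and_reverse_vowels s)

-- ===== LEMMAS AND PROOFS =====

-- the vowel positions of l, as naturals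
def pvPos (l : List Char) : List Nat :=
  (List.range l.length).filter (fun i => pvIsVowel (l.getD i ' '))

-- Nat-level mirror of the swap loop (proof helper)
def pvSwapN (P : List Nat) (lst : List Char) (l r : Nat) : List Char :=
  if l < r then
    pvSwapN P ((lst.set (P.getD l 0) (lst.getD (P.getD r 0) ' ')).set (P.getD r 0) (lst.getD (P.getD l 0) ' ')) (l + 1) (r - 1)
  else lst
termination_by r - l

lemma pvPos_nodup (l : List Char) : (pvPos l).Nodup :=
  List.Nodup.filter _ (List.nodup_range)

lemma pvPos_lt (l : List Char) : ∀ p ∈ pvPos l, p < l.length := by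
  intro p hp
  simp only [pvPos, List.mem_filter, List.mem_range] at hp
  exact hp.1

lemma mem_pvPos (l : List Char) {i : Nat} (h : i < l.length) :
    i ∈ pvPos l ↔ pvIsVowel (l.getD i ' ') = true := by
  simp [pvPos, List.mem_filter, List.mem_range, h]

lemma pv_getD_map_char (l : List Char) (P : List Nat) (k : Nat) (hk : k < P.length) :
    (P.map (fun p => l.getD p ' ')).getD k ' ' = l.getD (P.getD k 0) ' ' := by
  rw [List.getD_eq_getElem _ _ (by simpa using hk), List.getD_eq_getElem _ _ hk, List.getElem_map]

lemma pv_getD_reverse (xs : List Char) (k : Nat) (hk : k < xs.length) :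
    xs.reverse.getD k ' ' = xs.getD (xs.length - 1 - k) ' ' := by
  rw [List.getD_eq_getElem _ _ (by simpa using hk), List.getElem_reverse,
    List.getD_eq_getElem _ _ (by omega)]

lemma pv_filter_eq_map (v : Char → Bool) (l : List Char) :
    l.filter v = ((List.range l.length).filter (fun i => v (l.getD i ' '))).map (fun p => l.getD p ' ') := by
  induction l with
  | nil => rfl
  | cons c cs ih =>
    simp only [List.length_cons, List.range_succ_eq_map, List.filter_cons, List.filter_map]
    by_cases hc : v c
    · simp [hc, ih, Function.comp_def]
    · simp [hc, ih, Function.comp_def]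

lemma pv_idxOf_filter_range (f : Nat → Bool) (n i : Nat) (h : i < n) (hf : f i = true) :
    ((List.range n).filter f).idxOf i = ((List.range i).filter f).length := by
  have hn : n = i + (n - i) := by omega
  rw [hn, List.range_add, List.filter_append, List.idxOf_append]
  have hni : i ∉ (List.range i).filter f := by
    intro hmem
    have := List.mem_range.mp (List.mem_of_mem_filter hmem)
    omega
  simp only [hni, ite_false]
  have h1 : 0 < n - i := by omega
  obtain ⟨m, hm⟩ : ∃ m, n - i = m + 1 := ⟨n - i - 1, by omega⟩
  rw [hm, List.range_succ_eq_map]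
  simp [hf]

lemma pv_countP_take (v : Char → Bool) (l : List Char) (i : Nat) (hi : i ≤ l.length) :
    (l.take i).countP v = ((List.range i).filter (fun j => v (l.getD j ' '))).length := by
  have hlen : (l.take i).length = i := by
    rw [List.length_take]; omega
  rw [List.countP_eq_length_filter, pv_filter_eq_map v (l.take i), List.length_map, hlen]
  congr 1
  apply List.filter_congr
  intro j hj
  have hj' : j < i := List.mem_range.mp hj
  have e : (l.take i).getD j ' ' = l.getD j ' ' := by
    rw [List.getD_eq_getElem _ _ (by rw [hlen]; exact hj'), List.getElem_take,
      List.getD_eq_getElem _ _ (by omega)]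
  rw [e]

lemma pvFillRev_length (l : List Char) : ∀ vs : List Char, (pvFillRev l vs).length = l.length := by
  induction l with
  | nil => intro vs; rfl
  | cons c cs ih =>
    intro vs
    by_cases hc : pvIsVowel c
    · cases vs with
      | nil => simp [pvFillRev, hc, ih]
      | cons v rest => simp [pvFillRev, hc, ih]
    · simp [pvFillRev, hc, ih]

lemma pvFillRev_getD (l : List Char) : ∀ (vs : List Char) (i : Nat),
    vs.length = (l.filter pvIsVowel).length → i < l.length →
    (pvFillRev l vs).getD i ' ' =
      if pvIsVowel (l.getD i ' ') then vs.getD ((l.take i).countP pvIsVowel) ' ' else l.getD i ' ' := by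
  induction l with
  | nil => intro vs i _ hi; simp at hi
  | cons c cs ih =>
    intro vs i hlen hi
    by_cases hc : pvIsVowel c
    · rw [List.filter_cons_of_pos hc] at hlen
      cases vs with
      | nil => simp at hlen
      | cons v rest =>
        simp only [List.length_cons, Nat.succ.injEq] at hlen
        cases i with
        | zero => simp [pvFillRev, hc]
        | succ j =>
          have hj : j < cs.length := by simpa using hi
          simpa [pvFillRev, hc, List.countP_cons, List.getD] using ih rest j hlen hj
    · rw [List.filter_cons_of_neg hc] at hlen
      cases i with
      | zero => simp [pvFillRev, hc]
      | succ j =>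
        have hj : j < cs.length := by simpa using hi
        simpa [pvFillRev, hc, List.countP_cons, List.getD] using ih vs j hlen hj

lemma pvFillRev_of_vowelfree (l : List Char) (vs : List Char)
    (h : ∀ c ∈ l, pvIsVowel c = false) : pvFillRev l vs = l := by
  induction l generalizing vs with
  | nil => rfl
  | cons c cs ih =>
    have hc := h c (by simp)
    simp [pvFillRev, hc, ih _ (fun x hx => h x (by simp [hx]))]

lemma pv_getD_set_set (lst : List Char) (pl pr : Nat) (hpl : pl < lst.length)
    (hpr : pr < lst.length) (hne : pl ≠ pr) (x : Nat) :
    ((lst.set pl (lst.getD pr ' ')).set pr (lst.getD pl ' ')).getD x ' ' =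
      if x = pl then lst.getD pr ' ' else if x = pr then lst.getD pl ' ' else lst.getD x ' ' := by
  by_cases hx : x < lst.length
  · have hset2 : x < ((lst.set pl (lst.getD pr ' ')).set pr (lst.getD pl ' ')).length := by
      simpa using hx
    rw [List.getD_eq_getElem _ _ hset2, List.getElem_set]
    by_cases h1 : pr = x
    · rw [if_pos h1, if_neg (by omega), if_pos h1.symm]
    · rw [if_neg h1, List.getElem_set]
      by_cases h2 : pl = x
      · rw [if_pos h2, if_pos h2.symm]
      · rw [if_neg h2, if_neg (by omega), if_neg (by omega), List.getD_eq_getElem _ _ hx]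
  · have hxx : lst.length ≤ x := by omega
    rw [if_neg (by omega : ¬ x = pl), if_neg (by omega : ¬ x = pr),
      List.getD_eq_default _ _ (by simpa using hxx), List.getD_eq_default _ _ hxx]

lemma pvSwapN_length (P : List Nat) (lst : List Char) (l r : Nat) :
    (pvSwapN P lst l r).length = lst.length := by
  fun_induction pvSwapN P lst l r with
  | case1 lst l r h ih => rw [ih]; simp
  | case2 lst l r h => rfl

lemma pvSwapN_getD (P : List Nat) (hnd : P.Nodup) (lst : List Char) (l r : Nat) (i : Nat) :
    r < P.length → (∀ p ∈ P, p < lst.length) →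
    (pvSwapN P lst l r).getD i ' ' =
      (if i ∈ P ∧ l ≤ P.idxOf i ∧ P.idxOf i ≤ r
       then lst.getD (P.getD (l + r - P.idxOf i) 0) ' '
       else lst.getD i ' ') := by
  fun_induction pvSwapN P lst l r with
  | case1 lst l r h ih =>
    intro hr hlt
    have hlP : l < P.length := by omega
    have hpl_mem : P.getD l 0 ∈ P := by
      rw [List.getD_eq_getElem _ _ hlP]; exact List.getElem_mem _
    have hpr_mem : P.getD r 0 ∈ P := by
      rw [List.getD_eq_getElem _ _ hr]; exact List.getElem_mem _
    have hpl : P.getD l 0 < lst.length := hlt _ hpl_mem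
    have hpr : P.getD r 0 < lst.length := hlt _ hpr_mem
    have hinj : ∀ a b : Nat, a < P.length → b < P.length → P.getD a 0 = P.getD b 0 → a = b := by
      intro a b ha hb e
      rw [List.getD_eq_getElem _ _ ha, List.getD_eq_getElem _ _ hb] at e
      exact hnd.getElem_inj_iff.mp e
    have hne : P.getD l 0 ≠ P.getD r 0 := by
      intro e; have := hinj _ _ hlP hr e; omega
    have hlt' : ∀ p ∈ P,
        p < ((lst.set (P.getD l 0) (lst.getD (P.getD r 0) ' ')).set (P.getD r 0) (lst.getD (P.getD l 0) ' ')).length := by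
      intro p hp; simpa using hlt p hp
    rw [ih (by omega) hlt']
    by_cases hiP : i ∈ P
    · have hidx : P.idxOf i < P.length := List.idxOf_lt_length_of_mem hiP
      have hPidx : P.getD (P.idxOf i) 0 = i := by
        rw [List.getD_eq_getElem _ _ hidx]; exact List.getElem_idxOf hidx
      by_cases hcase : l + 1 ≤ P.idxOf i ∧ P.idxOf i ≤ r - 1
      · have hm : l + 1 + (r - 1) - P.idxOf i < P.length := by omega
        have hne1 : ¬ P.getD (l + 1 + (r - 1) - P.idxOf i) 0 = P.getD l 0 := by
          intro e; have := hinj _ _ hm hlP e; omega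
        have hne2 : ¬ P.getD (l + 1 + (r - 1) - P.idxOf i) 0 = P.getD r 0 := by
          intro e; have := hinj _ _ hm hr e; omega
        rw [if_pos ⟨hiP, hcase.1, hcase.2⟩, if_pos ⟨hiP, by omega, by omega⟩,
          pv_getD_set_set lst _ _ hpl hpr hne, if_neg hne1, if_neg hne2]
        have em : l + 1 + (r - 1) - P.idxOf i = l + r - P.idxOf i := by omega
        rw [em]
      · rw [if_neg (fun hc => hcase ⟨hc.2.1, hc.2.2⟩)]
        by_cases hl : P.idxOf i = l
        · have hi_pl : i = P.getD l 0 := by rw [← hl, hPidx]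
          rw [pv_getD_set_set lst _ _ hpl hpr hne, if_pos hi_pl,
            if_pos ⟨hiP, by omega, by omega⟩]
          have em : l + r - P.idxOf i = r := by omega
          rw [em]
        · by_cases hr' : P.idxOf i = r
          · have hi_pr : i = P.getD r 0 := by rw [← hr', hPidx]
            have hi_ne_pl : ¬ i = P.getD l 0 := by
              rw [hi_pr]; intro e; exact hne e.symm
            rw [pv_getD_set_set lst _ _ hpl hpr hne, if_neg hi_ne_pl, if_pos hi_pr,
              if_pos ⟨hiP, by omega, by omega⟩]
            have em : l + r - P.idxOf i = l := by omega
            rw [em]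
          · have hne1 : ¬ i = P.getD l 0 := by
              intro e
              have : P.getD (P.idxOf i) 0 = P.getD l 0 := by rw [hPidx]; exact e
              exact hl (hinj _ _ hidx hlP this)
            have hne2 : ¬ i = P.getD r 0 := by
              intro e
              have : P.getD (P.idxOf i) 0 = P.getD r 0 := by rw [hPidx]; exact e
              exact hr' (hinj _ _ hidx hr this)
            have hout : P.idxOf i < l ∨ r < P.idxOf i := by
              rcases not_and_or.mp hcase with h' | h' <;> omega
            rw [pv_getD_set_set lst _ _ hpl hpr hne, if_neg hne1, if_neg hne2,
              if_neg (fun hc => by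
                rcases hout with h' | h' <;>
                  [exact absurd hc.2.1 (by omega); exact absurd hc.2.2 (by omega)])]
    · have hne1 : ¬ i = P.getD l 0 := by intro e; rw [e] at hiP; exact hiP hpl_mem
      have hne2 : ¬ i = P.getD r 0 := by intro e; rw [e] at hiP; exact hiP hpr_mem
      rw [if_neg (fun hc => hiP hc.1), pv_getD_set_set lst _ _ hpl hpr hne,
        if_neg hne1, if_neg hne2, if_neg (fun hc => hiP hc.1)]
  | case2 lst l r h =>
    intro hr hlt
    by_cases hc : i ∈ P ∧ l ≤ P.idxOf i ∧ P.idxOf i ≤ r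
    · obtain ⟨hiP, h2, h3⟩ := hc
      have hidx : P.idxOf i < P.length := List.idxOf_lt_length_of_mem hiP
      have hPidx : P.getD (P.idxOf i) 0 = i := by
        rw [List.getD_eq_getElem _ _ hidx]; exact List.getElem_idxOf hidx
      rw [if_pos ⟨hiP, h2, h3⟩]
      have em : l + r - P.idxOf i = P.idxOf i := by omega
      rw [em, hPidx]
    · rw [if_neg hc]

lemma pvSwapLoop_eq_swapN (P : List Nat) (lst : List Char) (l r : Nat) (hr : r < P.length) :
    pvSwapLoop (P.map (fun x : Nat => (x : Int))) lst (l : Int) (r : Int) = pvSwapN P lst l r := by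
  fun_induction pvSwapN P lst l r with
  | case1 lst l r h ih =>
    have hlr : (l : Int) < (r : Int) := by exact_mod_cast h
    have hlP : l < P.length := by omega
    have e1 : (P.map (fun x : Nat => (x : Int))).getD l 0 = ((P.getD l 0 : Nat) : Int) := by
      rw [List.getD_eq_getElem _ _ (by simpa using hlP), List.getD_eq_getElem _ _ hlP]
      exact List.getElem_map _
    have e2 : (P.map (fun x : Nat => (x : Int))).getD r 0 = ((P.getD r 0 : Nat) : Int) := by
      rw [List.getD_eq_getElem _ _ (by simpa using hr), List.getD_eq_getElem _ _ hr]
      exact List.getElem_map _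
    rw [← ih (by omega)]
    conv_lhs => rw [pvSwapLoop.eq_def]
    rw [if_pos hlr]
    simp only [PySem.List.pyGetD_natCast, PySem.List.pySetD_natCast, e1, e2]
    have ecast1 : (l : Int) + 1 = ((l + 1 : Nat) : Int) := by push_cast; ring
    have ecast2 : (r : Int) - 1 = ((r - 1 : Nat) : Int) := by omega
    rw [ecast1, ecast2]
  | case2 lst l r h =>
    rw [pvSwapLoop.eq_def, if_neg (by exact_mod_cast h : ¬ (l : Int) < (r : Int))]

lemma pv_pos_eq (l : List Char) :
    (PySem.List.pyRange 0 (l.length : Int)).filter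
        (fun i => pvIsVowel (PySem.List.pyGetD l i ' ')) =
      (pvPos l).map (fun x : Nat => (x : Int)) := by
  rw [PySem.List.pyRange_zero_natCast, List.filter_map]
  simp only [pvPos]
  congr 1
  apply List.filter_congr
  intro j _
  simp [Function.comp, PySem.List.pyGetD_natCast]

lemma pv_main (l : List Char) :
    pvSwapLoop ((pvPos l).map (fun x : Nat => (x : Int))) l 0
        ((((pvPos l).map (fun x : Nat => (x : Int))).length : Int) - 1) =
      pvFillRev l ((l.filter pvIsVowel).reverse) := by
  have hnd := pvPos_nodup l
  have hlt := pvPos_lt l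
  have hfm : l.filter pvIsVowel = (pvPos l).map (fun p => l.getD p ' ') := by
    simp only [pvPos]; exact pv_filter_eq_map pvIsVowel l
  have hVlen : (l.filter pvIsVowel).length = (pvPos l).length := by
    rw [hfm, List.length_map]
  rcases Nat.eq_zero_or_pos (pvPos l).length with h0 | hpos
  · have hP : pvPos l = [] := List.eq_nil_of_length_eq_zero h0
    have hfe : l.filter pvIsVowel = [] := by rw [hfm, hP]; rfl
    rw [hP, hfe]
    simp only [List.map_nil, List.length_nil, List.reverse_nil]
    rw [pvSwapLoop.eq_def, if_neg (by norm_num)]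
    exact (pvFillRev_of_vowelfree l [] (fun c hc => by
      simpa using List.filter_eq_nil_iff.mp hfe c hc)).symm
  · obtain ⟨m, hm⟩ : ∃ m, (pvPos l).length = m + 1 := ⟨(pvPos l).length - 1, by omega⟩
    have hlenmap : (((pvPos l).map (fun x : Nat => (x : Int))).length : Int) - 1 = ((m : Nat) : Int) := by
      rw [List.length_map, hm]; push_cast; ring
    have h0' : (0 : Int) = ((0 : Nat) : Int) := rfl
    rw [hlenmap, h0', pvSwapLoop_eq_swapN (pvPos l) l 0 m (by omega)]
    apply List.ext_getElem
    · rw [pvSwapN_length, pvFillRev_length]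
    · intro i h1 h2
      have hi : i < l.length := by rwa [pvSwapN_length] at h1
      rw [← List.getD_eq_getElem _ ' ' h1, ← List.getD_eq_getElem _ ' ' h2,
        pvSwapN_getD (pvPos l) hnd l 0 m i (by omega) hlt,
        pvFillRev_getD l _ i (by rw [List.length_reverse]) hi]
      by_cases hv : pvIsVowel (l.getD i ' ') = true
      · have hiP : i ∈ pvPos l := (mem_pvPos l hi).mpr hv
        have hidx : (pvPos l).idxOf i < (pvPos l).length := List.idxOf_lt_length_of_mem hiP
        have hrank : (pvPos l).idxOf i = (l.take i).countP pvIsVowel := by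
          rw [pv_countP_take pvIsVowel l i (le_of_lt hi)]
          simp only [pvPos]
          exact pv_idxOf_filter_range _ _ _ hi hv
        have hkV : (pvPos l).idxOf i < (l.filter pvIsVowel).length := by
          rw [hVlen]; exact hidx
        rw [if_pos ⟨hiP, by omega, by omega⟩, if_pos hv, ← hrank,
          pv_getD_reverse _ _ hkV]
        have em : (l.filter pvIsVowel).length - 1 - (pvPos l).idxOf i = m - (pvPos l).idxOf i := by
          rw [hVlen, hm]; omega
        rw [em, hfm, pv_getD_map_char l (pvPos l) (m - (pvPos l).idxOf i) (by omega)]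
        have em2 : 0 + m - (pvPos l).idxOf i = m - (pvPos l).idxOf i := by omega
        rw [em2]
      · rw [if_neg (fun hc => hv ((mem_pvPos l hi).mp hc.1)), if_neg hv]

-- ===== VERDICT (by name: the statement is the Claim_ definition above) =====
theorem alternate_case_and_reverse_vowels_spec : Claim_equal_alternate_case_and_reverse_vowels := by
  intro s _
  unfold Spec_alternate_case_and_reverse_vowels
  unfold alternate_case_and_reverse_vowels alternate_case_and_reverse_vowels_alt
  simp only [pv_pos_eq]
  exact congrArg String.ofList (pv_main (pvCased s.toList))
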